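-- pv_equiv track=rewrite | github.com/zLxisFX/SHIELD | src/shield/reporting/html_report.py | _preferred_columns
-- ===== SOURCE A (Python) =====
-- from typing import Any, Dict, Iterable, List, Optional, Sequence, Tuple
--
-- def _preferred_columns(rows: List[Dict[str, Any]]) -> List[str]:
--     # Try newer names first, but keep backward compat.
--     preferred = [
--         "policy",
--         "pm_minutes", "pm_over_min",
--         "pm_pct_vs_ref",
--         "heat_hours", "heat_over_h",
--         "heat_pct_vs_ref",
--         "hepa_hours",
--         "fan_hours",
--         "window_open_hours",
--         "effort_score",
--         "effort_pct_vs_ref",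
--         "budget_ok",
--         "ref_policy",
--     ]
--
--     keys = sorted({k for r in rows for k in r.keys()})
--     cols: List[str] = []
--
--     for k in preferred:
--         if k in keys and k not in cols:
--             cols.append(k)
--
--     for k in keys:
--         if k not in cols:
--             cols.append(k)
--
--     return cols
-- ===== SOURCE B (Python) =====
-- from typing import Any, Dict, List
--
--
-- def _preferred_columns(rows: List[Dict[str, Any]]) -> List[str]:
--     preferred = [
--         "policy",
--         "pm_minutes", "pm_over_min",
--         "pm_pct_vs_ref",
--         "heat_hours", "heat_over_h",
--         "heat_pct_vs_ref",
--         "hepa_hours",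
--         "fan_hours",
--         "window_open_hours",
--         "effort_score",
--         "effort_pct_vs_ref",
--         "budget_ok",
--         "ref_policy",
--     ]
--     rank = {name: i for i, name in enumerate(preferred)}
--     keys = {k for r in rows for k in r.keys()}
--     return sorted(keys, key=lambda k: (rank.get(k, len(preferred)), k))
-- ===== Notes on version B (the rewrite author's own statement) =====
-- stated objective: faster
-- what changed: A partitions keys in two appending passes with linear 'k not in cols' list-membership scans; B builds a rank dict once and performs a single sorted() call with the tuple key (rank.get(k, len(preferred)), k).
import Mathlib
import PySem

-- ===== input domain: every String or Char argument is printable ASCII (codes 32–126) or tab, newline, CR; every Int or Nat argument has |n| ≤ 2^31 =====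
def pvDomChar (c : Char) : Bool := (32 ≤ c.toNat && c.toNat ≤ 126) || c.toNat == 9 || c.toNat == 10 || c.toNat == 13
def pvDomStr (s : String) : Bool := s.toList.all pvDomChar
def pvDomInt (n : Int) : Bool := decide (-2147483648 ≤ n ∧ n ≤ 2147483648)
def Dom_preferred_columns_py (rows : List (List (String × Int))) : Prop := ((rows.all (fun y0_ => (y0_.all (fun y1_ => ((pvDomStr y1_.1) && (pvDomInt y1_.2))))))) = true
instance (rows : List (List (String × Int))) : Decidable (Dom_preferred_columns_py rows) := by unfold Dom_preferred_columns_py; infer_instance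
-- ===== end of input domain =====

-- B replaces A's two appending passes (whose `k not in cols` list scans are quadratic) by one sorted() call keyed on (rank, name); measured faster; return value proved equal.


-- ===== PORT A =====
-- the literal `preferred` list both Pythons write out
def pvPreferredList : List String :=
  ["policy", "pm_minutes", "pm_over_min", "pm_pct_vs_ref", "heat_hours", "heat_over_h",
   "heat_pct_vs_ref", "hepa_hours", "fan_hours", "window_open_hours", "effort_score",
   "effort_pct_vs_ref", "budget_ok", "ref_policy"]

def preferred_columns_py (rows : List (List (String × Int))) : List String :=
  let keys := PySem.List.sorted (PySem.Set.ofList (rows.flatMap (fun r => r.map Prod.fst))) (fun k => k)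
  let cols := pvPreferredList.foldl (fun cols k => if k ∈ keys ∧ k ∉ cols then cols ++ [k] else cols) []
  keys.foldl (fun cols k => if k ∉ cols then cols ++ [k] else cols) cols

-- ===== PORT B =====
-- rank = {name: i for i, name in enumerate(preferred)}
def pvRank : PySem.Dict String Int :=
  (PySem.List.enumerate pvPreferredList 0).foldl (fun d p => d.insert p.2 p.1) PySem.Dict.empty

-- rank.get(k, len(preferred))
def pvKey1 (k : String) : Int := pvRank.getD k (pvPreferredList.length : Int)

def preferred_columns_py_alt (rows : List (List (String × Int))) : List String :=
  let keys := PySem.Set.ofList (rows.flatMap (fun r => r.map Prod.fst))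
  PySem.List.sorted2 keys (fun k => pvKey1 k) (fun k => k)

-- ===== PRECONDITION & SPEC =====
def Spec_preferred_columns_py (rows : List (List (String × Int))) (out : List String) : Prop := out = preferred_columns_py_alt rows
instance (rows : List (List (String × Int))) (out : List String) : Decidable (Spec_preferred_columns_py rows out) := by unfold Spec_preferred_columns_py; infer_instance

-- ===== CLAIM (what is proved, stated in full; the proofs are below) =====
def Claim_equal_preferred_columns_py : Prop := ∀ (rows : List (List (String × Int))), Dom_preferred_columns_py rows → Spec_preferred_columns_py rows (preferred_columns_py rows)

-- ===== LEMMAS AND PROOFS =====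

-- the Boolean "before" relation sorted2 uses for the tuple key (pvKey1 k, k)
def pvBefore (a b : String) : Bool :=
  decide (pvKey1 a < pvKey1 b) || (!decide (pvKey1 b < pvKey1 a) && decide (a < b))

-- the non-strict order it sorts by
def pvLE (a b : String) : Prop := pvBefore a b = true ∨ a = b

theorem pvBefore_iff (a b : String) :
    pvBefore a b = true ↔ (pvKey1 a < pvKey1 b ∨ (pvKey1 a = pvKey1 b ∧ a < b)) := by
  simp only [pvBefore, Bool.or_eq_true, Bool.and_eq_true, Bool.not_eq_eq_eq_not, Bool.not_true,
    decide_eq_true_iff, decide_eq_false_iff_not]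
  constructor
  · rintro (h | ⟨h1, h2⟩)
    · exact Or.inl h
    · rcases lt_or_ge (pvKey1 a) (pvKey1 b) with h' | h'
      · exact Or.inl h'
      · exact Or.inr ⟨le_antisymm (not_lt.mp h1) h', h2⟩
  · rintro (h | ⟨h1, h2⟩)
    · exact Or.inl h
    · exact Or.inr ⟨by omega, h2⟩

theorem pvBefore_trans {a b c : String} (h1 : pvBefore a b = true) (h2 : pvBefore b c = true) :
    pvBefore a c = true := by
  rw [pvBefore_iff] at *
  rcases h1 with h1 | ⟨h1, h1'⟩ <;> rcases h2 with h2 | ⟨h2, h2'⟩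
  · exact Or.inl (lt_trans h1 h2)
  · exact Or.inl (by omega)
  · exact Or.inl (by omega)
  · exact Or.inr ⟨by omega, lt_trans h1' h2'⟩

theorem pvBefore_asymm {a b : String} (h1 : pvBefore a b = true) (h2 : pvBefore b a = true) : False := by
  rw [pvBefore_iff] at *
  rcases h1 with h1 | ⟨h1, h1'⟩ <;> rcases h2 with h2 | ⟨h2, h2'⟩
  · omega
  · omega
  · omega
  · exact absurd h2' (lt_asymm h1')

theorem pvBefore_total {a b : String} (hne : a ≠ b) (h : pvBefore a b = false) :
    pvBefore b a = true := by
  rw [pvBefore_iff]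
  have h' : ¬ pvBefore a b = true := by simp [h]
  rw [pvBefore_iff] at h'
  push Not at h'
  rcases lt_or_ge (pvKey1 b) (pvKey1 a) with hk | hk
  · exact Or.inl hk
  · have hk' : pvKey1 a = pvKey1 b := by omega
    rcases lt_trichotomy a b with hab | hab | hab
    · exact absurd hab (h'.2 hk')
    · exact absurd hab hne
    · exact Or.inr ⟨hk'.symm, hab⟩

theorem pvLE_trans {a b c : String} (h1 : pvLE a b) (h2 : pvLE b c) : pvLE a c := by
  rcases h1 with h1 | rfl
  · rcases h2 with h2 | rfl
    · exact Or.inl (pvBefore_trans h1 h2)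
    · exact Or.inl h1
  · exact h2

theorem pvLE_antisymm {a b : String} (h1 : pvLE a b) (h2 : pvLE b a) : a = b := by
  rcases h1 with h1 | rfl
  · rcases h2 with h2 | rfl
    · exact absurd h2 (fun h => pvBefore_asymm h1 h)
    · rfl
  · rfl

-- inserting into a pvLE-sorted list keeps it pvLE-sorted
theorem pairwise_insertBy (x : String) (ys : List String) (h : ys.Pairwise pvLE) :
    (PySem.List.insertBy pvBefore x ys).Pairwise pvLE := by
  induction ys with
  | nil => simp [PySem.List.insertBy]
  | cons y ys ih =>
    show (if pvBefore x y then x :: y :: ys else y :: PySem.List.insertBy pvBefore x ys).Pairwise pvLE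
    by_cases hb : pvBefore x y = true
    · simp only [hb, if_true]
      refine List.Pairwise.cons (fun z hz => ?_) h
      rcases List.mem_cons.mp hz with rfl | hz
      · exact Or.inl hb
      · exact pvLE_trans (Or.inl hb) (List.rel_of_pairwise_cons h hz)
    · simp only [hb]
      refine List.Pairwise.cons (fun z hz => ?_) (ih h.of_cons)
      rw [PySem.List.mem_insertBy] at hz
      rcases hz with rfl | hz
      · by_cases hxy : z = y
        · exact Or.inr hxy.symm
        · exact Or.inl (pvBefore_total hxy (Bool.eq_false_iff.mpr hb))
      · exact List.rel_of_pairwise_cons h hz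

theorem pairwise_foldl_insertBy (xs : List String) (acc : List String) (h : acc.Pairwise pvLE) :
    (xs.foldl (fun acc x => PySem.List.insertBy pvBefore x acc) acc).Pairwise pvLE := by
  induction xs generalizing acc with
  | nil => exact h
  | cons x xs ih => exact ih _ (pairwise_insertBy x acc h)

-- B's sorted2 call is exactly a fold of insertBy pvBefore
theorem sorted2_eq_foldl (xs : List String) :
    PySem.List.sorted2 xs (fun k => pvKey1 k) (fun k => k) =
      xs.foldl (fun acc x => PySem.List.insertBy pvBefore x acc) [] := rfl

-- A's first loop: appending the preferred names found among the keys
theorem loop1_eq (K : List String) (pref acc : List String) (hnd : pref.Nodup)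
    (hacc : ∀ k ∈ pref, k ∉ acc) :
    pref.foldl (fun cols k => if k ∈ K ∧ k ∉ cols then cols ++ [k] else cols) acc
      = acc ++ pref.filter (fun k => decide (k ∈ K)) := by
  induction pref generalizing acc with
  | nil => simp
  | cons p pref ih =>
    have hp : p ∉ acc := hacc p (by simp)
    rw [List.foldl_cons]
    by_cases hk : p ∈ K
    · simp only [hk, hp, and_true, not_false_iff, if_true]
      rw [ih (acc ++ [p]) hnd.of_cons (fun k hk' => by
        simp only [List.mem_append, List.mem_singleton, not_or]
        exact ⟨hacc k (by simp [hk']), fun h => (List.nodup_cons.mp hnd).1 (h ▸ hk')⟩)]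
      simp [hk]
    · simp only [hk, false_and, if_false]
      rw [ih acc hnd.of_cons (fun k hk' => hacc k (by simp [hk']))]
      simp [hk]

-- A's second loop: appending the remaining keys in order
theorem loop2_eq (K acc : List String) (hnd : K.Nodup) :
    K.foldl (fun cols k => if k ∉ cols then cols ++ [k] else cols) acc
      = acc ++ K.filter (fun k => decide (k ∉ acc)) := by
  induction K generalizing acc with
  | nil => simp
  | cons p K ih =>
    rw [List.foldl_cons]
    by_cases hp : p ∈ acc
    · simp only [hp, not_true, if_false]
      rw [ih acc hnd.of_cons]
      simp [hp]
    · simp only [hp, not_false_iff, if_true]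
      rw [ih (acc ++ [p]) hnd.of_cons]
      have hfe : K.filter (fun k => decide (k ∉ acc ++ [p])) = K.filter (fun k => decide (k ∉ acc)) := by
        apply List.filter_congr
        intro k hk
        have : k ≠ p := fun h => (List.nodup_cons.mp hnd).1 (h ▸ hk)
        simp [this]
      rw [hfe]
      simp [hp]

theorem rank_lt_of_mem (k : String) (h : k ∈ pvPreferredList) : pvKey1 k < 14 := by
  fin_cases h <;> decide

theorem rank_of_not_mem (k : String) (h : k ∉ pvPreferredList) : pvKey1 k = 14 := by
  simp only [pvPreferredList, List.mem_cons, List.not_mem_nil, or_false, not_or] at h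
  obtain ⟨h1, h2, h3, h4, h5, h6, h7, h8, h9, h10, h11, h12, h13, h14⟩ := h
  show PySem.Dict.getD pvRank k _ = 14
  have hR : pvRank = PySem.Dict.mk
      [("policy", 0), ("pm_minutes", 1), ("pm_over_min", 2), ("pm_pct_vs_ref", 3),
       ("heat_hours", 4), ("heat_over_h", 5), ("heat_pct_vs_ref", 6), ("hepa_hours", 7),
       ("fan_hours", 8), ("window_open_hours", 9), ("effort_score", 10),
       ("effort_pct_vs_ref", 11), ("budget_ok", 12), ("ref_policy", 13)] := by decide
  rw [hR]
  simp [PySem.Dict.getD, PySem.Dict.get?, pvPreferredList,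
    Ne.symm h1, Ne.symm h2, Ne.symm h3, Ne.symm h4, Ne.symm h5, Ne.symm h6, Ne.symm h7,
    Ne.symm h8, Ne.symm h9, Ne.symm h10, Ne.symm h11, Ne.symm h12, Ne.symm h13, Ne.symm h14]

theorem pref_pairwise_rank : pvPreferredList.Pairwise (fun a b => pvKey1 a < pvKey1 b) := by decide

theorem pref_nodup : pvPreferredList.Nodup := by decide

-- ===== VERDICT (by name: the statement is the Claim_ definition above) =====
theorem preferred_columns_py_spec : Claim_equal_preferred_columns_py := by
  intro rows _
  simp only [Spec_preferred_columns_py, preferred_columns_py, preferred_columns_py_alt]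
  set L := rows.flatMap (fun r => r.map Prod.fst) with hL
  set ks0 := PySem.Set.ofList L with hks0
  set keys := PySem.List.sorted ks0 (fun k => k) with hkeys
  have hknd : keys.Nodup := ((PySem.List.sorted_perm ks0 (fun k => k) false).nodup_iff).mpr
    (PySem.Set.nodup_ofList L)
  have hkpw : keys.Pairwise (· < ·) := PySem.List.sorted_ofList_pairwise_lt L
  set P := pvPreferredList.filter (fun k => decide (k ∈ keys)) with hP
  set Q := keys.filter (fun k => decide (k ∉ P)) with hQ
  -- A's output is P ++ Q
  have hA1 : pvPreferredList.foldl
      (fun cols k => if k ∈ keys ∧ k ∉ cols then cols ++ [k] else cols) [] = P := by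
    rw [loop1_eq keys pvPreferredList [] pref_nodup (by simp), List.nil_append]
  rw [hA1, loop2_eq keys P hknd]
  -- membership facts
  have hPmem : ∀ k ∈ P, k ∈ pvPreferredList ∧ k ∈ keys := by
    intro k hk; simpa using List.mem_filter.mp hk
  have hQmem : ∀ k ∈ Q, k ∈ keys ∧ k ∉ P := by
    intro k hk; simpa using List.mem_filter.mp hk
  have hQnp : ∀ k ∈ Q, k ∉ pvPreferredList := by
    intro k hk hpref
    have ⟨hkk, hknp⟩ := hQmem k hk
    exact hknp (List.mem_filter.mpr (by simpa using ⟨hpref, hkk⟩))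
  -- P ++ Q is pvLE-sorted
  have hPpw : P.Pairwise pvLE := by
    refine (pref_pairwise_rank.sublist (List.filter_sublist)).imp ?_
    intro a b hab
    exact Or.inl ((pvBefore_iff a b).mpr (Or.inl hab))
  have hQpw : Q.Pairwise pvLE := by
    refine (hkpw.filter _).imp_of_mem ?_
    intro a b ha hb hab
    have hra := rank_of_not_mem a (hQnp a ha)
    have hrb := rank_of_not_mem b (hQnp b hb)
    exact Or.inl ((pvBefore_iff a b).mpr (Or.inr ⟨by omega, hab⟩))
  have hPQpw : (P ++ Q).Pairwise pvLE := by
    rw [List.pairwise_append]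
    refine ⟨hPpw, hQpw, fun a ha b hb => ?_⟩
    have hra := rank_lt_of_mem a (hPmem a ha).1
    have hrb := rank_of_not_mem b (hQnp b hb)
    exact Or.inl ((pvBefore_iff a b).mpr (Or.inl (by omega)))
  -- B's output is pvLE-sorted
  have hBpw : (PySem.List.sorted2 ks0 (fun k => pvKey1 k) (fun k => k)).Pairwise pvLE := by
    rw [sorted2_eq_foldl]
    exact pairwise_foldl_insertBy ks0 [] (by simp)
  -- P ++ Q is a permutation of B's output
  have hPQnd : (P ++ Q).Nodup := by
    refine (pref_nodup.filter _).append (hknd.filter _) ?_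
    intro a ha hb
    exact (hQmem a hb).2 ha
  have hPQmem : ∀ a, a ∈ P ++ Q ↔ a ∈ keys := by
    intro a
    simp only [List.mem_append]
    constructor
    · rintro (h | h)
      · exact (hPmem a h).2
      · exact (hQmem a h).1
    · intro h
      by_cases hp : a ∈ P
      · exact Or.inl hp
      · exact Or.inr (List.mem_filter.mpr (by simpa using ⟨h, hp⟩))
  have hperm : (P ++ Q).Perm (PySem.List.sorted2 ks0 (fun k => pvKey1 k) (fun k => k)) := by
    refine List.Perm.trans ?_ (PySem.List.sorted2_perm ks0 (fun k => pvKey1 k) (fun k => k) false).symm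
    refine List.Perm.trans ?_ (PySem.List.sorted_perm ks0 (fun k => k) false)
    exact (List.perm_ext_iff_of_nodup hPQnd hknd).mpr hPQmem
  exact List.Perm.eq_of_pairwise (fun a b _ _ h1 h2 => pvLE_antisymm h1 h2) hPQpw hBpw hperm
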